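-- pv_equiv track=rewrite | github.com/dang3r/advent-of-code-2018 | 02_inventory.py | box_checksum
-- ===== SOURCE A (Python) =====
-- from collections import Counter
--
-- def box_checksum(box_ids):
--     d = {2:0, 3:0}
--     for box in box_ids:
--         c = Counter(box)
--         done = {2:False,3:False}
--         for char, count in c.most_common():
--             if not done[3] and count == 3:
--                 done[3] = True
--                 d[3] += 1
--             elif not done[2] and count == 2:
--                 done[2] = True
--                 d[2] += 1
--             elif count < 2 or (done[2] and done[3]):
--                 break
--     return d[2] * d[3]
-- ===== SOURCE B (Python) =====
-- from collections import Counter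
--
--
-- def box_checksum(box_ids):
--     twos = 0
--     threes = 0
--     for box in box_ids:
--         vals = set(Counter(box).values())
--         if 2 in vals:
--             twos += 1
--         if 3 in vals:
--             threes += 1
--     return twos * threes
-- ===== Notes on version B (the rewrite author's own statement) =====
-- stated objective: simpler
-- what changed: Replaces the ordered most_common() sort traversed with done-flags and a break by an unordered set of the counter's values and two plain membership tests.
import Mathlib
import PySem

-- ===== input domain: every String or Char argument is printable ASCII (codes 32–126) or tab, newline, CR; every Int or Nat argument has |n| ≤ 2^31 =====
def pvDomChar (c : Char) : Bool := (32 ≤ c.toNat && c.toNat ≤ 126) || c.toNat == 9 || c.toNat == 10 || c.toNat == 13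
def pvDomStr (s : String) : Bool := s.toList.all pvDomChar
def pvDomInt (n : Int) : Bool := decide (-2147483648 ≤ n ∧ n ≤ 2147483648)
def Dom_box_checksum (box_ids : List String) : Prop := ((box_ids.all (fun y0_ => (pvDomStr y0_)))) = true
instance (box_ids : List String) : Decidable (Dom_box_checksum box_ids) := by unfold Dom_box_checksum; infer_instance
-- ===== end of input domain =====

-- B drops A's most_common() ordered traversal with done-flags and break, using the set of
-- count values and two membership tests instead; objective: simpler.

-- ===== PORT A =====
-- inner 'for char, count in c.most_common()' loop with the done-flags and the break
def pvLoopA : List (Char × Int) → Bool → Bool → Int → Int → Int × Int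
  | [], _, _, d2, d3 => (d2, d3)
  | (_, count) :: rest, done2, done3, d2, d3 =>
    if done3 = false ∧ count = 3 then pvLoopA rest done2 true d2 (d3 + 1)
    else if done2 = false ∧ count = 2 then pvLoopA rest true done3 (d2 + 1) d3
    else if count < 2 ∨ (done2 = true ∧ done3 = true) then (d2, d3)
    else pvLoopA rest done2 done3 d2 d3

def box_checksum (box_ids : List String) : Int :=
  let d : Int × Int := box_ids.foldl
    (fun (d : Int × Int) box =>
      let c : PySem.Dict Char Int := PySem.Dict.counter box.toList
      -- c.most_common() = sorted(c.items(), key=count, reverse=True)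
      pvLoopA (PySem.List.sorted c.items (fun p => p.2) true) false false d.1 d.2)
    (0, 0)
  d.1 * d.2

-- ===== PORT B =====
def box_checksum_alt (box_ids : List String) : Int :=
  let r : Int × Int := box_ids.foldl
    (fun (a : Int × Int) box =>
      let vals : PySem.Set Int := PySem.Set.ofList (PySem.Dict.counter box.toList).values
      let twos := if PySem.Set.contains vals 2 then a.1 + 1 else a.1
      let threes := if PySem.Set.contains vals 3 then a.2 + 1 else a.2
      (twos, threes))
    (0, 0)
  r.1 * r.2

-- ===== PRECONDITION & SPEC =====
def Spec_box_checksum (box_ids : List String) (out : Int) : Prop := out = box_checksum_alt box_ids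
instance (box_ids : List String) (out : Int) : Decidable (Spec_box_checksum box_ids out) := by unfold Spec_box_checksum; infer_instance

-- ===== CLAIM (what is proved, stated in full; the proofs are below) =====
def Claim_equal_box_checksum : Prop := ∀ (box_ids : List String), Dom_box_checksum box_ids → Spec_box_checksum box_ids (box_checksum box_ids)

-- ===== LEMMAS AND PROOFS =====

-- On a count-descending list, A's flagged early-exit loop just adds the 2- and 3-membership indicators.
theorem pvLoopA_spec : ∀ (l : List (Char × Int)),
    l.Pairwise (fun a b => b.2 ≤ a.2) → ∀ (done2 done3 : Bool) (d2 d3 : Int),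
    pvLoopA l done2 done3 d2 d3 =
      (d2 + (if done2 = false ∧ (2 : Int) ∈ l.map Prod.snd then 1 else 0),
       d3 + (if done3 = false ∧ (3 : Int) ∈ l.map Prod.snd then 1 else 0)) := by
  intro l
  induction l with
  | nil => intro _ done2 done3 d2 d3; simp [pvLoopA]
  | cons hd rest ih =>
    intro hp done2 done3 d2 d3
    obtain ⟨ch, count⟩ := hd
    rw [List.pairwise_cons] at hp
    obtain ⟨hhd, hrest⟩ := hp
    have hhd' : ∀ x ∈ rest.map Prod.snd, x ≤ count := by
      intro x hx
      rcases List.mem_map.mp hx with ⟨p, hpmem, rfl⟩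
      exact hhd p hpmem
    by_cases h3 : done3 = false ∧ count = 3
    · simp only [pvLoopA, if_pos h3, ih hrest]
      obtain ⟨hd3, hc⟩ := h3
      subst hd3 hc
      simp [List.map_cons, List.mem_cons]
    · by_cases h2 : done2 = false ∧ count = 2
      · simp only [pvLoopA, if_neg h3, if_pos h2, ih hrest]
        obtain ⟨hd2, hc⟩ := h2
        subst hd2 hc
        simp [List.map_cons, List.mem_cons]
      · by_cases hbrk : count < 2 ∨ (done2 = true ∧ done3 = true)
        · simp only [pvLoopA, if_neg h3, if_neg h2, if_pos hbrk]
          rcases hbrk with hlt | ⟨hb2, hb3⟩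
          · have hne2 : ¬((2 : Int) = count) := by omega
            have hne3 : ¬((3 : Int) = count) := by omega
            have hnm2 : ¬((2 : Int) ∈ rest.map Prod.snd) := fun h => by
              have := hhd' 2 h; omega
            have hnm3 : ¬((3 : Int) ∈ rest.map Prod.snd) := fun h => by
              have := hhd' 3 h; omega
            simp [List.map_cons, List.mem_cons, hne2, hne3, hnm2, hnm3]
          · subst hb2 hb3; simp
        · simp only [pvLoopA, if_neg h3, if_neg h2, if_neg hbrk, ih hrest]
          rw [Prod.mk.injEq]
          constructor
          · by_cases hd2 : done2 = false
            · have hne : ¬((2 : Int) = count) := fun hc => h2 ⟨hd2, hc.symm⟩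
              simp [List.map_cons, List.mem_cons, hd2, hne]
            · simp [hd2]
          · by_cases hd3 : done3 = false
            · have hne : ¬((3 : Int) = count) := fun hc => h3 ⟨hd3, hc.symm⟩
              simp [List.map_cons, List.mem_cons, hd3, hne]
            · simp [hd3]

-- membership in the second components is invariant under sorting (a permutation)
theorem mem_map_snd_sorted (l : List (Char × Int)) (x : Int) :
    x ∈ (PySem.List.sorted l (fun p => p.2) true).map Prod.snd ↔ x ∈ l.map Prod.snd :=
  List.Perm.mem_iff ((PySem.List.sorted_perm l (fun p => p.2) true).map Prod.snd)

-- the two per-box step functions agree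
theorem step_eq (d : Int × Int) (box : String) :
    pvLoopA (PySem.List.sorted (PySem.Dict.counter box.toList).items (fun p => p.2) true)
        false false d.1 d.2 =
      (let vals : PySem.Set Int := PySem.Set.ofList (PySem.Dict.counter box.toList).values
       (if PySem.Set.contains vals 2 then d.1 + 1 else d.1,
        if PySem.Set.contains vals 3 then d.2 + 1 else d.2)) := by
  rw [pvLoopA_spec _ (PySem.List.sorted_pairwise_rev _ _)]
  simp only [mem_map_snd_sorted]
  have hv : (PySem.Dict.counter box.toList).values
      = ((PySem.Dict.counter box.toList).items).map Prod.snd := rfl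
  have h2 : PySem.Set.contains (PySem.Set.ofList ((PySem.Dict.counter box.toList).values)) (2 : Int)
      = decide ((2 : Int) ∈ ((PySem.Dict.counter box.toList).items).map Prod.snd) := by
    simp [PySem.Set.contains, PySem.Set.mem_ofList, hv]
  have h3 : PySem.Set.contains (PySem.Set.ofList ((PySem.Dict.counter box.toList).values)) (3 : Int)
      = decide ((3 : Int) ∈ ((PySem.Dict.counter box.toList).items).map Prod.snd) := by
    simp [PySem.Set.contains, PySem.Set.mem_ofList, hv]
  simp only [h2, h3]
  rw [Prod.mk.injEq]
  refine ⟨?_, ?_⟩ <;> split_ifs with ha hb <;> simp_all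

-- ===== VERDICT (by name: the statement is the Claim_ definition above) =====
theorem box_checksum_spec : Claim_equal_box_checksum := by
  intro box_ids _
  unfold Spec_box_checksum box_checksum box_checksum_alt
  rw [PySem.List.foldl_congr_mem box_ids
    (fun (d : Int × Int) box =>
      pvLoopA (PySem.List.sorted (PySem.Dict.counter box.toList).items (fun p => p.2) true)
        false false d.1 d.2)
    (fun (a : Int × Int) box =>
      let vals : PySem.Set Int := PySem.Set.ofList (PySem.Dict.counter box.toList).values
      (if PySem.Set.contains vals 2 then a.1 + 1 else a.1,
       if PySem.Set.contains vals 3 then a.2 + 1 else a.2))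
    (0, 0)
    (fun d box _ => step_eq d box)]
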